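-- pv_equiv track=rewrite | github.com/CYF1980/opencv_on_jetson | opencv_diag.py | extract_from_buildinfo
-- ===== SOURCE A (Python) =====
-- def extract_from_buildinfo(build_info: str, keys):
--     out = {}
--     for k in keys:
--         v = None
--         for line in build_info.splitlines():
--             if line.strip().startswith(k):
--                 v = line.split(":", 1)[1].strip()
--                 break
--         out[k] = v
--     return out
-- ===== SOURCE B (Python) =====
-- def extract_from_buildinfo(build_info: str, keys):
--     keys = list(keys)
--     out = {k: None for k in keys}
--     for line in build_info.splitlines():
--         s = line.strip()
--         for k in keys:
--             if out[k] is None and s.startswith(k):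
--                 out[k] = line.split(":", 1)[1].strip()
--     return out
-- ===== Notes on version B (the rewrite author's own statement) =====
-- stated objective: faster
-- what changed: B splits the text into lines once and makes a single pass over the lines, filling each still-unresolved key at its first matching line, instead of A's per-key loop that re-splits the whole text for every key.
import Mathlib
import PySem

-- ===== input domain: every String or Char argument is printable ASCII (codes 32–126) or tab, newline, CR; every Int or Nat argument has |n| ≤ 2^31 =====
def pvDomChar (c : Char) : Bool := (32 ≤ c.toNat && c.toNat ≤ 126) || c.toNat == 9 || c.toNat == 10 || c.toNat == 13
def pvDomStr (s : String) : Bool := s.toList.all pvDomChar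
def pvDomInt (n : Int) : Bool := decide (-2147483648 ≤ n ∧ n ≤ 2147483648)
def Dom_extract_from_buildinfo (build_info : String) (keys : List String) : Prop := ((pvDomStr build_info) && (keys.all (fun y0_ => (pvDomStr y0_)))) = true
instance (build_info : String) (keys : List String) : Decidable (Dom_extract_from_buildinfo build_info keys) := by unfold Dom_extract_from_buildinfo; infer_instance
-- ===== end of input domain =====

-- B replaces A's per-key rescan of the whole text by one split of the text and one pass over
-- its lines (alternative decomposition, same result); equivalence is proved on Pre_, the
-- inputs where the Python A returns (first matching line of every key contains ':').

-- shared expression `line.split(":", 1)[1].strip()` (identical in Source A and Source B)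
def pvLineVal (line : String) : Option String :=
  ((PySem.Str.splitMax? line ":" 1).bind (fun parts => PySem.List.pyGet? parts 1)).map PySem.Str.strip

-- ===== PORT A =====
-- inner `for line ...: if ...: v = ...; break` loop of A
def pvAFind (k : String) : List String → Option String
  | [] => none
  | line :: rest =>
      if PySem.Str.startswith (PySem.Str.strip line) k then pvLineVal line
      else pvAFind k rest

def extract_from_buildinfo (build_info : String) (keys : List String) : List (String × Option String) :=
  (keys.foldl
    (fun (d : PySem.Dict String (Option String)) k =>
      d.insert k (pvAFind k (PySem.Str.splitlines build_info)))
    PySem.Dict.empty).items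

-- ===== PORT B =====
def extract_from_buildinfo_alt (build_info : String) (keys : List String) : List (String × Option String) :=
  let out0 : PySem.Dict String (Option String) :=
    keys.foldl (fun d k => d.insert k none) PySem.Dict.empty
  ((PySem.Str.splitlines build_info).foldl
    (fun d line =>
      let s := PySem.Str.strip line
      keys.foldl
        (fun d k =>
          if (d.getD k none).isNone && PySem.Str.startswith s k then d.insert k (pvLineVal line)
          else d)
        d)
    out0).items

-- ===== PRECONDITION & SPEC =====
-- Pre_ excludes exactly the inputs on which the Python A raises IndexError: some key's first
-- matching line contains no ':' (split(":",1) then has fewer than 2 parts).  B raises there too.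
def Pre_extract_from_buildinfo (build_info : String) (keys : List String) : Prop :=
  (keys.all (fun k =>
    match (PySem.Str.splitlines build_info).find?
            (fun l => PySem.Str.startswith (PySem.Str.strip l) k) with
    | none => true
    | some l => decide (2 ≤ ((PySem.Str.splitMax? l ":" 1).getD []).length))) = true
instance (build_info : String) (keys : List String) : Decidable (Pre_extract_from_buildinfo build_info keys) := by unfold Pre_extract_from_buildinfo; infer_instance

def pvWitness_extract_from_buildinfo : String × List String := ("Version: 4.5.1\nCUDA: YES", ["CUDA", "Version"])

def Spec_extract_from_buildinfo (build_info : String) (keys : List String) (out : List (String × Option String)) : Prop := out = extract_from_buildinfo_alt build_info keys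
instance (build_info : String) (keys : List String) (out : List (String × Option String)) : Decidable (Spec_extract_from_buildinfo build_info keys out) := by unfold Spec_extract_from_buildinfo; infer_instance

-- ===== CLAIM (what is proved, stated in full; the proofs are below) =====
def Claim_equal_extract_from_buildinfo : Prop := ∀ (build_info : String) (keys : List String), Dom_extract_from_buildinfo build_info keys → Pre_extract_from_buildinfo build_info keys → Spec_extract_from_buildinfo build_info keys (extract_from_buildinfo build_info keys)

-- ===== LEMMAS AND PROOFS =====

-- A's inner loop is `find?` followed by the value extraction
theorem pvAFind_eq_find? (k : String) (L : List String) :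
    pvAFind k L
      = ((L.find? (fun l => PySem.Str.startswith (PySem.Str.strip l) k)).bind pvLineVal) := by
  induction L with
  | nil => rfl
  | cons l rest ih =>
      by_cases h : PySem.Str.startswith (PySem.Str.strip l) k = true
      · rw [List.find?_cons_of_pos (p := fun l => PySem.Str.startswith (PySem.Str.strip l) k) h]
        show (if PySem.Str.startswith (PySem.Str.strip l) k = true
              then pvLineVal l else pvAFind k rest) = _
        rw [if_pos h]
        rfl
      · rw [List.find?_cons_of_neg (p := fun l => PySem.Str.startswith (PySem.Str.strip l) k) h]
        show (if PySem.Str.startswith (PySem.Str.strip l) k = true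
              then pvLineVal l else pvAFind k rest) = _
        rw [if_neg h]
        exact ih

-- getD after a fold inserting F k at each k
theorem getD_foldl_insert_fn (F : String → Option String) (l : List String) :
    ∀ (d : PySem.Dict String (Option String)) (k : String),
      (l.foldl (fun d x => d.insert x (F x)) d).getD k none
        = if k ∈ l then F k else d.getD k none := by
  induction l with
  | nil => intro d k; simp
  | cons x xs ih =>
      intro d k
      simp only [List.foldl_cons, ih, PySem.Dict.getD_insert, List.mem_cons]
      by_cases hx : k ∈ xs
      · simp [hx]
      · by_cases he : k = x <;> simp [hx, he]

-- a line contains ':' (split has ≥ 2 parts) → the extracted value is `some`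
theorem pvLineVal_isSome (l : String)
    (h : 2 ≤ ((PySem.Str.splitMax? l ":" 1).getD []).length) :
    (pvLineVal l).isSome = true := by
  unfold pvLineVal
  cases hs : PySem.Str.splitMax? l ":" 1 with
  | none => rw [hs] at h; simp at h
  | some parts =>
      rw [hs] at h
      simp only [Option.getD_some] at h
      cases parts with
      | nil => simp at h
      | cons a t =>
          cases t with
          | nil => simp at h
          | cons b t' => simp [PySem.List.pyGet?, PySem.List.pyIdx?]

-- B's inner (per-line) loop: effect on a single lookup
theorem inner_getD (q : String → Bool) (w : Option String) (ks : List String) :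
    ∀ (d : PySem.Dict String (Option String)) (j : String),
      (ks.foldl (fun d k => if (d.getD k none).isNone && q k then d.insert k w else d) d).getD j none
        = if j ∈ ks ∧ (d.getD j none).isNone ∧ q j then w else d.getD j none := by
  induction ks with
  | nil => intro d j; simp
  | cons x xs ih =>
      intro d j
      simp only [List.foldl_cons]
      by_cases hc : ((d.getD x none).isNone && q x) = true
      · rw [if_pos hc, ih]
        obtain ⟨h1, h2⟩ := Bool.and_eq_true_iff.mp hc
        by_cases hj : j = x
        · subst hj
          simp [List.mem_cons, h1, h2]
        · simp only [PySem.Dict.getD_insert, if_neg hj, List.mem_cons]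
          simp [hj]
      · rw [if_neg hc, ih]
        by_cases hj : j = x
        · subst hj
          have hnc : ¬((d.getD j none).isNone = true ∧ q j = true) := by
            simpa [Bool.and_eq_true] using hc
          rw [if_neg (fun hh => hnc ⟨hh.2.1, hh.2.2⟩), if_neg (fun hh => hnc ⟨hh.2.1, hh.2.2⟩)]
        · simp [List.mem_cons, hj]

-- B's inner (per-line) loop preserves the key list when every k ∈ ks is already present
theorem inner_keys (q : String → Bool) (w : Option String) (ks : List String) :
    ∀ (d : PySem.Dict String (Option String)), (∀ k ∈ ks, k ∈ d.keys) →
      (ks.foldl (fun d k => if (d.getD k none).isNone && q k then d.insert k w else d) d).keys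
        = d.keys := by
  induction ks with
  | nil => intro d _; rfl
  | cons x xs ih =>
      intro d hd
      simp only [List.foldl_cons]
      by_cases hc : ((d.getD x none).isNone && q x) = true
      · have hx : d.contains x = true :=
          (PySem.Dict.contains_iff_mem_keys d x).mpr (hd x (List.mem_cons_self ..))
        have hk : (d.insert x w).keys = d.keys := PySem.Dict.keys_insert_of_contains d w hx
        rw [if_pos hc, ih _ (fun k hkx => by rw [hk]; exact hd k (List.mem_cons_of_mem _ hkx)), hk]
      · rw [if_neg hc, ih _ (fun k hkx => hd k (List.mem_cons_of_mem _ hkx))]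

-- B's outer (per-line) fold: keys preserved
theorem outer_keys (keys : List String) (L : List String) :
    ∀ (d : PySem.Dict String (Option String)), (∀ k ∈ keys, k ∈ d.keys) →
      (L.foldl
        (fun d line =>
          keys.foldl
            (fun d k =>
              if (d.getD k none).isNone && PySem.Str.startswith (PySem.Str.strip line) k
              then d.insert k (pvLineVal line) else d) d) d).keys = d.keys := by
  induction L with
  | nil => intro d _; rfl
  | cons l L' ih =>
      intro d hd
      simp only [List.foldl_cons]
      rw [ih _ (fun k hk => by
            rw [inner_keys _ _ _ _ hd]; exact hd k hk),
          inner_keys _ _ _ _ hd]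

-- B's outer fold: each still-unresolved key gets the value of its first matching line
theorem outer_getD (keys : List String) (L : List String) :
    ∀ (d : PySem.Dict String (Option String)),
      (∀ k ∈ keys, d.getD k none = none →
        ∀ l, L.find? (fun l => PySem.Str.startswith (PySem.Str.strip l) k) = some l →
          2 ≤ ((PySem.Str.splitMax? l ":" 1).getD []).length) →
      ∀ j ∈ keys,
        (L.foldl
          (fun d line =>
            keys.foldl
              (fun d k =>
                if (d.getD k none).isNone && PySem.Str.startswith (PySem.Str.strip line) k
                then d.insert k (pvLineVal line) else d) d) d).getD j none
          = (d.getD j none).or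
              ((L.find? (fun l => PySem.Str.startswith (PySem.Str.strip l) j)).bind pvLineVal) := by
  induction L with
  | nil => intro d _ j _; simp
  | cons l L' ih =>
      intro d hC j hj
      simp only [List.foldl_cons]
      set d' := keys.foldl
        (fun d k =>
          if (d.getD k none).isNone && PySem.Str.startswith (PySem.Str.strip l) k
          then d.insert k (pvLineVal l) else d) d with hd'
      have hgd' : ∀ i, d'.getD i none
          = if i ∈ keys ∧ (d.getD i none).isNone ∧ PySem.Str.startswith (PySem.Str.strip l) i
            then pvLineVal l else d.getD i none := fun i =>
        inner_getD (fun k => PySem.Str.startswith (PySem.Str.strip l) k) (pvLineVal l) keys d i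
      have hC' : ∀ k ∈ keys, d'.getD k none = none →
          ∀ m, L'.find? (fun l => PySem.Str.startswith (PySem.Str.strip l) k) = some m →
            2 ≤ ((PySem.Str.splitMax? m ":" 1).getD []).length := by
        intro k hk hnone m hm
        rw [hgd' k] at hnone
        by_cases hcond : k ∈ keys ∧ (d.getD k none).isNone = true ∧
            PySem.Str.startswith (PySem.Str.strip l) k = true
        · -- key k matched line l and its value became none: contradicts the precondition
          rw [if_pos hcond] at hnone
          have hfind : (l :: L').find? (fun l => PySem.Str.startswith (PySem.Str.strip l) k)
              = some l := List.find?_cons_of_pos hcond.2.2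
          have hcol := hC k hk (Option.isNone_iff_eq_none.mp hcond.2.1) l hfind
          have := pvLineVal_isSome l hcol
          rw [hnone] at this; simp at this
        · rw [if_neg hcond] at hnone
          have hP : ¬ (PySem.Str.startswith (PySem.Str.strip l) k = true) :=
            fun hPk => hcond ⟨hk, by rw [hnone]; rfl, hPk⟩
          have hfind : (l :: L').find? (fun l => PySem.Str.startswith (PySem.Str.strip l) k)
              = some m := by
            rw [List.find?_cons_of_neg (p := fun l => PySem.Str.startswith (PySem.Str.strip l) k) hP]
            exact hm
          exact hC k hk hnone m hfind
      rw [ih d' hC' j hj, hgd' j]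
      by_cases hP : PySem.Str.startswith (PySem.Str.strip l) j = true
      · rw [List.find?_cons_of_pos (p := fun l => PySem.Str.startswith (PySem.Str.strip l) j) hP]
        cases hdj : d.getD j none with
        | some v =>
            rw [if_neg (fun hh => by simpa using hh.2.1)]
            simp
        | none =>
            have hfind : (l :: L').find? (fun l => PySem.Str.startswith (PySem.Str.strip l) j)
                = some l := List.find?_cons_of_pos hP
            have hcol := hC j hj hdj l hfind
            obtain ⟨w, hw⟩ := Option.isSome_iff_exists.mp (pvLineVal_isSome l hcol)
            rw [if_pos ⟨hj, rfl, hP⟩]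
            simp [hw]
      · rw [List.find?_cons_of_neg (p := fun l => PySem.Str.startswith (PySem.Str.strip l) j) hP,
            if_neg (fun hh => hP hh.2.2)]

-- ===== VERDICT (by name: the statement is the Claim_ definition above) =====
theorem extract_from_buildinfo_spec : Claim_equal_extract_from_buildinfo := by
  intro build_info keys _hdom hpre
  unfold Spec_extract_from_buildinfo
  unfold extract_from_buildinfo extract_from_buildinfo_alt
  unfold Pre_extract_from_buildinfo at hpre
  set lines := PySem.Str.splitlines build_info with hlines
  set dA := keys.foldl (fun (d : PySem.Dict String (Option String)) k =>
    d.insert k (pvAFind k lines)) PySem.Dict.empty with hdA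
  set d0 := keys.foldl (fun (d : PySem.Dict String (Option String)) k =>
    d.insert k (none : Option String)) PySem.Dict.empty with hd0
  have hAkeys : dA.keys = PySem.Set.ofList keys := by
    rw [hdA, PySem.Dict.keys_foldl_insert keys (fun _ k => pvAFind k lines)]
    simp [PySem.Set.update_nil_left]
  have hBkeys0 : d0.keys = PySem.Set.ofList keys := by
    rw [hd0, PySem.Dict.keys_foldl_insert keys (fun _ _ => (none : Option String))]
    simp [PySem.Set.update_nil_left]
  have hd0getD : ∀ k, d0.getD k none = none := by
    intro k
    rw [hd0, getD_foldl_insert_fn (fun _ => none) keys PySem.Dict.empty k]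
    split <;> simp
  have hpre' : ∀ k ∈ keys, d0.getD k none = none →
      ∀ l, lines.find? (fun l => PySem.Str.startswith (PySem.Str.strip l) k) = some l →
        2 ≤ ((PySem.Str.splitMax? l ":" 1).getD []).length := by
    intro k hk _ l hl
    rw [List.all_eq_true] at hpre
    have hthis := hpre k hk
    rw [hl] at hthis
    simpa using hthis
  set dB := lines.foldl
    (fun d line =>
      keys.foldl
        (fun (d : PySem.Dict String (Option String)) k =>
          if (d.getD k none).isNone && PySem.Str.startswith (PySem.Str.strip line) k
          then d.insert k (pvLineVal line) else d) d) d0 with hdB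
  have hBkeys : dB.keys = PySem.Set.ofList keys := by
    rw [hdB, outer_keys keys lines d0 (fun k hk => by
      rw [hBkeys0]; exact (PySem.Set.mem_ofList keys k).mpr hk), hBkeys0]
  have hBgetD : ∀ j ∈ keys, dB.getD j none
      = (lines.find? (fun l => PySem.Str.startswith (PySem.Str.strip l) j)).bind pvLineVal := by
    intro j hj
    rw [hdB, outer_getD keys lines d0 hpre' j hj, hd0getD j, Option.none_or]
  have hAnodup : dA.keys.Nodup := by rw [hAkeys]; exact PySem.Set.nodup_ofList keys
  have hBnodup : dB.keys.Nodup := by rw [hBkeys]; exact PySem.Set.nodup_ofList keys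
  rw [PySem.Dict.items_eq_map_keys dA hAnodup none,
      PySem.Dict.items_eq_map_keys dB hBnodup none, hAkeys, hBkeys]
  apply List.map_congr_left
  intro k hk
  have hkmem : k ∈ keys := (PySem.Set.mem_ofList keys k).mp hk
  have hAget : dA.getD k none = pvAFind k lines := by
    rw [hdA, getD_foldl_insert_fn (fun k => pvAFind k lines) keys PySem.Dict.empty k,
        if_pos hkmem]
  rw [hAget, hBgetD k hkmem, pvAFind_eq_find?]
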